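-- pv_equiv track=rewrite | github.com/Armonis5/ThymioMob | camera.py | compute_transform_dimensions
-- ===== SOURCE A (Python) =====
-- def compute_transform_dimensions(dots):
--     """
--     Compute the dimensions of the map afeter the perspective transform
--     """
--     min_x = min(coord[0] for coord in dots)
--     max_x = max(coord[0] for coord in dots)
--     min_y = min(coord[1] for coord in dots)
--     max_y = max(coord [1] for coord in dots)
--     width = max_x - min_x
--     height = max_y - min_y
--     origin = (max_x, max_y)
--     return width, height, origin
-- ===== SOURCE B (Python) =====
-- def compute_transform_dimensions(dots):
--     it = iter(dots)
--     try:
--         x, y = next(it)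
--     except StopIteration:
--         raise ValueError("compute_transform_dimensions: empty input")
--     min_x = max_x = x
--     min_y = max_y = y
--     for px, py in it:
--         if px < min_x: min_x = px
--         if px > max_x: max_x = px
--         if py < min_y: min_y = py
--         if py > max_y: max_y = py
--     return max_x - min_x, max_y - min_y, (max_x, max_y)
-- ===== Notes on version B (the rewrite author's own statement) =====
-- stated objective: alternative
-- what changed: Replaces A's four separate min/max scans over the list with one single-pass loop maintaining four running extrema accumulators.
import Mathlib
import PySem

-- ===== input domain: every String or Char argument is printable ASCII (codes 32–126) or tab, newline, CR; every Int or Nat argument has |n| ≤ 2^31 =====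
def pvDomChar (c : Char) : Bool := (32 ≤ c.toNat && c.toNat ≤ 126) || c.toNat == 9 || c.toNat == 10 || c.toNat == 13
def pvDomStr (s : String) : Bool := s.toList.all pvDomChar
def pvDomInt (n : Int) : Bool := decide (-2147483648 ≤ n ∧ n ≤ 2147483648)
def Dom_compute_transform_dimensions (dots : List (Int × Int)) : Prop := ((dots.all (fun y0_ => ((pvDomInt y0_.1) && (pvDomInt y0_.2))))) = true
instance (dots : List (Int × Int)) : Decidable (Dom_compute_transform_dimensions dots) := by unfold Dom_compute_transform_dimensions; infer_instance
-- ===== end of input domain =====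

-- B replaces A's four separate min/max scans with one single-pass loop keeping four running extrema (same O(n), fewer passes).

-- ===== PORT A =====
-- A: four generator scans min/max over x- and y-coordinates (min/max on empty raise ValueError → excluded by Pre_).
def compute_transform_dimensions (dots : List (Int × Int)) : Int × Int × (Int × Int) :=
  let min_x := (PySem.List.min? (dots.map Prod.fst) (fun v => v)).getD 0
  let max_x := (PySem.List.max? (dots.map Prod.fst) (fun v => v)).getD 0
  let min_y := (PySem.List.min? (dots.map Prod.snd) (fun v => v)).getD 0
  let max_y := (PySem.List.max? (dots.map Prod.snd) (fun v => v)).getD 0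
  let width := max_x - min_x
  let height := max_y - min_y
  (width, height, (max_x, max_y))

-- ===== PORT B =====
-- B's loop body: update the four running extrema with one point.
def ctdStep (acc : Int × Int × Int × Int) (p : Int × Int) : Int × Int × Int × Int :=
  let (mnx, mxx, mny, mxy) := acc
  let mnx := if p.1 < mnx then p.1 else mnx
  let mxx := if p.1 > mxx then p.1 else mxx
  let mny := if p.2 < mny then p.2 else mny
  let mxy := if p.2 > mxy then p.2 else mxy
  (mnx, mxx, mny, mxy)

def compute_transform_dimensions_alt (dots : List (Int × Int)) : Int × Int × (Int × Int) :=
  match dots with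
  | [] => (0, 0, (0, 0))  -- B raises ValueError here; excluded by Pre_
  | (x, y) :: rest =>
    let (mnx, mxx, mny, mxy) := rest.foldl ctdStep (x, x, y, y)
    (mxx - mnx, mxy - mny, (mxx, mxy))

-- ===== PRECONDITION & SPEC =====
-- A raises ValueError (min of empty sequence) on the empty list; B raises ValueError there too.
def Pre_compute_transform_dimensions (dots : List (Int × Int)) : Prop := dots ≠ []
instance (dots : List (Int × Int)) : Decidable (Pre_compute_transform_dimensions dots) := by unfold Pre_compute_transform_dimensions; infer_instance
def pvWitness_compute_transform_dimensions : (List (Int × Int)) := [(1, 2), (5, -3)]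

def Spec_compute_transform_dimensions (dots : List (Int × Int)) (out : Int × Int × (Int × Int)) : Prop := out = compute_transform_dimensions_alt dots
instance (dots : List (Int × Int)) (out : Int × Int × (Int × Int)) : Decidable (Spec_compute_transform_dimensions dots out) := by unfold Spec_compute_transform_dimensions; infer_instance

-- ===== CLAIM (what is proved, stated in full; the proofs are below) =====
def Claim_equal_compute_transform_dimensions : Prop := ∀ (dots : List (Int × Int)), Dom_compute_transform_dimensions dots → Pre_compute_transform_dimensions dots → Spec_compute_transform_dimensions dots (compute_transform_dimensions dots)

-- ===== LEMMAS AND PROOFS =====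
-- B's single fold computes the four running min/max folds componentwise.
theorem ctdStep_foldl (t : List (Int × Int)) (a b c d : Int) :
    t.foldl ctdStep (a, b, c, d) =
      ((t.map Prod.fst).foldl min a, (t.map Prod.fst).foldl max b,
       (t.map Prod.snd).foldl min c, (t.map Prod.snd).foldl max d) := by
  induction t generalizing a b c d with
  | nil => simp
  | cons p t ih =>
    have h1 : (if p.1 < a then p.1 else a) = min a p.1 := by simp only [min_def]; split_ifs <;> omega
    have h2 : (if p.1 > b then p.1 else b) = max b p.1 := by simp only [max_def]; split_ifs <;> omega
    have h3 : (if p.2 < c then p.2 else c) = min c p.2 := by simp only [min_def]; split_ifs <;> omega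
    have h4 : (if p.2 > d then p.2 else d) = max d p.2 := by simp only [max_def]; split_ifs <;> omega
    simp only [List.foldl_cons, List.map_cons, ctdStep, h1, h2, h3, h4, ih]

theorem compute_transform_dimensions_spec : Claim_equal_compute_transform_dimensions := by
  intro dots _ hpre
  unfold Spec_compute_transform_dimensions
  match dots with
  | [] => exact absurd rfl hpre
  | (x, y) :: t =>
    simp only [compute_transform_dimensions, compute_transform_dimensions_alt,
      List.map_cons, PySem.List.min?_id_cons, PySem.List.max?_id_cons, Option.getD_some,
      ctdStep_foldl]
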